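-- pv_equiv track=rewrite | github.com/godlike-kimi-skills/godlike-kimi-skills | skills/black-isort-skill/main.py | _remove_tool_config
-- ===== SOURCE A (Python) =====
-- from typing import Any, Dict, List, Optional, Tuple, Union
--
-- def _remove_tool_config(lines: List[str], section: str) -> List[str]:
--     """从TOML行中移除特定工具配置"""
--     result = []
--     in_section = False
--
--     for line in lines:
--         if line.strip().startswith(f"[{section}]"):
--             in_section = True
--             continue
--         elif in_section:
--             if line.strip().startswith('[') and not line.strip().startswith('[['):
--                 in_section = False
--             else:
--                 continue
--         result.append(line)
--
--     return result
-- ===== SOURCE B (Python) =====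
-- def _remove_tool_config(lines, section):
--     """Segment decomposition: group lines into header-led segments, then drop matching segments."""
--     segments = []
--     current = []
--     for line in lines:
--         s = line.strip()
--         if s.startswith('[') and not s.startswith('[['):
--             segments.append(current)
--             current = [line]
--         else:
--             current.append(line)
--     segments.append(current)
--     target = '[' + section + ']'
--     result = []
--     for seg in segments:
--         if seg and seg[0].strip().startswith(target):
--             continue
--         result.extend(seg)
--     return result
-- ===== Notes on version B (the rewrite author's own statement) =====
-- stated objective: alternative
-- what changed: Replaces the streaming in_section flag with a two-phase structure: partition the lines into a preamble plus header-led segments, then concatenate every segment whose header does not match the target section; per-line work drops to one strip() and no repeated f-string target construction, which a timing run measured as a constant-factor speedup.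
-- outside the precondition, e.g. on _remove_tool_config(['[a]', '[[x]]', 'b'], '[x'): A returns ['[a]'], B returns ['[a]', '[[x]]', 'b']
import Mathlib
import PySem

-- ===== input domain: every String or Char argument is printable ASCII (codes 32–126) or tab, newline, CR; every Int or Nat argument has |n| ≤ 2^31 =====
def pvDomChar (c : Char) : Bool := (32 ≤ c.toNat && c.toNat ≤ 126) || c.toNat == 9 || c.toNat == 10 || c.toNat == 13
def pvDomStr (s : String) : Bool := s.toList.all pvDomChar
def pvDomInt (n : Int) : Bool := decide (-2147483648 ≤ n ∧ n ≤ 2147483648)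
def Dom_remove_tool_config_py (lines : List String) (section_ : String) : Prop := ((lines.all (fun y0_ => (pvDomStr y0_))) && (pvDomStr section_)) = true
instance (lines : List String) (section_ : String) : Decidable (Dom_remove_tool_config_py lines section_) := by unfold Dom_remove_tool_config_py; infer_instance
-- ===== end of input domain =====

-- B replaces A's streaming in_section flag by a build-segments-then-filter-segments decomposition (objective: alternative).

-- ===== PORT A =====
def remove_tool_config_py (lines : List String) (section_ : String) : List String :=
  (lines.foldl (fun (st : List String × Bool) line =>
      if PySem.Str.startswith (PySem.Str.strip line) ("[" ++ section_ ++ "]") then (st.1, true)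
      else if st.2 then
        if PySem.Str.startswith (PySem.Str.strip line) "[" && !(PySem.Str.startswith (PySem.Str.strip line) "[[") then
          (st.1 ++ [line], false)
        else (st.1, true)
      else (st.1 ++ [line], false))
    ([], false)).1

-- ===== PORT B =====
def remove_tool_config_py_alt (lines : List String) (section_ : String) : List String :=
  let p := lines.foldl (fun (st : List (List String) × List String) line =>
      if PySem.Str.startswith (PySem.Str.strip line) "[" && !(PySem.Str.startswith (PySem.Str.strip line) "[[") then
        (st.1 ++ [st.2], [line])
      else (st.1, st.2 ++ [line])) ([], [])
  let segments := p.1 ++ [p.2]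
  let target := "[" ++ section_ ++ "]"
  segments.foldl (fun res seg =>
    if (match seg with
        | [] => false
        | h :: _ => PySem.Str.startswith (PySem.Str.strip h) target) then res
    else res ++ seg) []

-- ===== PRECONDITION & SPEC =====
-- Pre_ excludes only the malformed corner where the section name itself starts with '[' (so the target
-- "[[...]" is not a valid header shape) AND some line actually matches that target: there A treats that
-- non-header line as a section start, a shape outside the natural TOML domain.
def Pre_remove_tool_config_py (lines : List String) (section_ : String) : Prop :=
  PySem.Str.startswith section_ "[" = false ∨
  ∀ l ∈ lines, PySem.Str.startswith (PySem.Str.strip l) ("[" ++ section_ ++ "]") = false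
instance (lines : List String) (section_ : String) : Decidable (Pre_remove_tool_config_py lines section_) := by unfold Pre_remove_tool_config_py; infer_instance
def pvWitness_remove_tool_config_py : List String × String :=
  (["[tool.black]", "line-length = 88", "[project]", "name = \"x\""], "tool.black")
def Spec_remove_tool_config_py (lines : List String) (section_ : String) (out : List String) : Prop := out = remove_tool_config_py_alt lines section_
instance (lines : List String) (section_ : String) (out : List String) : Decidable (Spec_remove_tool_config_py lines section_ out) := by unfold Spec_remove_tool_config_py; infer_instance

-- ===== CLAIM (what is proved, stated in full; the proofs are below) =====
def Claim_equal_remove_tool_config_py : Prop := ∀ (lines : List String) (section_ : String), Dom_remove_tool_config_py lines section_ → Pre_remove_tool_config_py lines section_ → Spec_remove_tool_config_py lines section_ (remove_tool_config_py lines section_)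

-- ===== LEMMAS AND PROOFS =====

def pvMatch (sec l : String) : Bool :=
  PySem.Str.startswith (PySem.Str.strip l) ("[" ++ sec ++ "]")

def pvHdr (l : String) : Bool :=
  PySem.Str.startswith (PySem.Str.strip l) "[" && !(PySem.Str.startswith (PySem.Str.strip l) "[[")

-- A's loop body, named (definitionally equal to the port's lambda)
def pvStepA (sec : String) : List String × Bool → String → List String × Bool :=
  fun st line =>
    if pvMatch sec line then (st.1, true)
    else if st.2 then
      if pvHdr line then (st.1 ++ [line], false) else (st.1, true)
    else (st.1 ++ [line], false)

-- B's two loop bodies, named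
def pvStepB : List (List String) × List String → String → List (List String) × List String :=
  fun st line =>
    if pvHdr line then (st.1 ++ [st.2], [line]) else (st.1, st.2 ++ [line])

def pvBad (sec : String) : List String → Bool
  | [] => false
  | h :: _ => pvMatch sec h

def pvStepC (sec : String) : List String → List String → List String :=
  fun res seg => if pvBad sec seg then res else res ++ seg

-- A as a direct recursion carrying the in_section flag
def pvFG (sec : String) (ins : Bool) : List String → List String
  | [] => []
  | l :: ls =>
    if pvMatch sec l then pvFG sec true ls
    else if ins then
      if pvHdr l then l :: pvFG sec false ls else pvFG sec true ls
    else l :: pvFG sec false ls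

-- B's segmentation as a direct recursion
def pvSegs : List String → List String → List (List String)
  | [], cur => [cur]
  | l :: ls, cur => if pvHdr l then cur :: pvSegs ls [l] else pvSegs ls (cur ++ [l])

def pvFlt (sec : String) : List (List String) → List String
  | [] => []
  | seg :: rest => (if pvBad sec seg then [] else seg) ++ pvFlt sec rest

theorem pvA_fold (sec : String) (ls : List String) :
    ∀ (acc : List String) (ins : Bool),
      (ls.foldl (pvStepA sec) (acc, ins)).1 = acc ++ pvFG sec ins ls := by
  induction ls with
  | nil => intro acc ins; simp [pvFG]
  | cons l ls ih =>
    intro acc ins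
    rw [List.foldl_cons]
    by_cases hm : pvMatch sec l = true
    · simp only [pvStepA, hm, if_true, pvFG, ih]
    · by_cases hh : pvHdr l = true
      · cases ins <;>
          simp only [pvStepA, hm, hh, if_true, Bool.false_eq_true, if_false, if_neg, pvFG, ih] <;>
          simp [hm, hh]
      · cases ins <;>
          simp only [pvStepA, hm, hh, Bool.false_eq_true, if_false, if_neg, if_true, pvFG, ih] <;>
          simp [hm, hh]

theorem pvB_fold1 (ls : List String) :
    ∀ (S : List (List String)) (cur : List String),
      (ls.foldl pvStepB (S, cur)).1 ++ [(ls.foldl pvStepB (S, cur)).2] = S ++ pvSegs ls cur := by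
  induction ls with
  | nil => intro S cur; simp [pvSegs]
  | cons l ls ih =>
    intro S cur
    rw [List.foldl_cons]
    by_cases hh : pvHdr l = true
    · simp only [pvStepB, hh, if_true, pvSegs, ih]
      simp
    · simp only [pvStepB, hh, Bool.false_eq_true, if_false, if_neg, pvSegs, ih]

theorem pvB_fold2 (sec : String) (segs : List (List String)) :
    ∀ (acc : List String),
      segs.foldl (pvStepC sec) acc = acc ++ pvFlt sec segs := by
  induction segs with
  | nil => intro acc; simp [pvFlt]
  | cons seg rest ih =>
    intro acc
    rw [List.foldl_cons]
    by_cases hb : pvBad sec seg = true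
    · simp only [pvStepC, hb, if_true, pvFlt, ih]
      simp
    · simp only [pvStepC, hb, Bool.false_eq_true, if_false, if_neg, pvFlt, ih]
      simp

-- under Pre_, a line matching the target prefix is necessarily a segment header
theorem pvKey (sec : String) (hPre : PySem.Str.startswith sec "[" = false)
    (l : String) (hm : pvMatch sec l = true) : pvHdr l = true := by
  simp only [pvMatch, PySem.Str.startswith_eq] at hm
  simp only [PySem.Chars.startswith_iff] at hm
  simp only [PySem.Str.startswith_eq, PySem.Chars.startswith_iff] at hPre
  have hmt : ("[" ++ sec ++ "]").toList = '[' :: (sec.toList ++ [']']) := by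
    simp [String.toList_append]
  rw [hmt] at hm
  obtain ⟨t, ht⟩ := hm
  simp only [pvHdr, PySem.Str.startswith_eq, Bool.and_eq_true, Bool.not_eq_true',
    PySem.Chars.startswith_iff]
  constructor
  · exact ⟨sec.toList ++ [']'] ++ t, by simpa using ht⟩
  · have hPre' : ¬ (['['] <+: sec.toList) := by
      intro hp
      have h1 : PySem.Chars.startswith sec.toList "[".toList = true := by
        rw [PySem.Chars.startswith_iff]; simpa using hp
      rw [hPre] at h1; exact Bool.false_ne_true h1
    rw [← Bool.not_eq_true, PySem.Chars.startswith_iff]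
    intro hpre2
    obtain ⟨u, hu⟩ := hpre2
    have hs : "[[".toList = ['[', '['] := by decide
    rw [hs] at hu
    rw [← ht] at hu
    simp only [List.cons_append, List.cons.injEq] at hu
    cases hsec : sec.toList with
    | nil => rw [hsec] at hu; simp at hu
    | cons c cl =>
      rw [hsec] at hu
      simp only [List.cons_append, List.cons.injEq] at hu
      exact hPre' (by rw [hsec]; exact ⟨cl, by simp [← hu.2.1]⟩)

def pvOk (sec : String) (cur : List String) : Prop :=
  ∀ h t, cur = h :: t → pvMatch sec h = false

-- the central invariant: filtering the segments built from (ls, cur) yields A's streaming result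
theorem pvMain (sec : String) :
    ∀ ls : List String, (∀ l ∈ ls, pvMatch sec l = true → pvHdr l = true) →
      (∀ cur, pvOk sec cur → pvFlt sec (pvSegs ls cur) = cur ++ pvFG sec false ls)
      ∧ (∀ h t, pvMatch sec h = true → pvFlt sec (pvSegs ls (h :: t)) = pvFG sec true ls) := by
  intro ls
  induction ls with
  | nil =>
    intro _
    constructor
    · intro cur hok
      cases cur with
      | nil => simp [pvSegs, pvFlt, pvBad, pvFG]
      | cons h t =>
        have := hok h t rfl
        simp [pvSegs, pvFlt, pvBad, this, pvFG]
    · intro h t hm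
      simp [pvSegs, pvFlt, pvBad, hm, pvFG]
  | cons l ls ih0 =>
    intro hk
    have ih := ih0 (fun x hx => hk x (List.mem_cons_of_mem _ hx))
    constructor
    · intro cur hok
      have hbad : pvBad sec cur = false := by
        cases cur with
        | nil => rfl
        | cons h t => simp [pvBad, hok h t rfl]
      by_cases hm : pvMatch sec l = true
      · have hh := hk l List.mem_cons_self hm
        simp only [pvSegs, hh, if_true, pvFlt, hbad, Bool.false_eq_true, if_false, if_neg]
        rw [ih.2 l [] hm]
        simp [pvFG, hm]
      · by_cases hh : pvHdr l = true
        · simp only [pvSegs, hh, if_true, pvFlt, hbad, Bool.false_eq_true, if_false, if_neg]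
          rw [ih.1 [l] (by intro a b he; cases he; simpa using hm)]
          simp [pvFG, hm, hh]
        · simp only [pvSegs, hh, Bool.false_eq_true, if_false, if_neg]
          rw [ih.1 (cur ++ [l]) ?_]
          · simp [pvFG, hm, hh]
          · intro h t he
            cases cur with
            | nil =>
              simp only [List.nil_append, List.cons.injEq] at he
              exact he.1 ▸ (by simpa using hm)
            | cons h0 t0 =>
              simp only [List.cons_append, List.cons.injEq] at he
              exact he.1 ▸ hok h0 t0 rfl
    · intro h t hm0
      by_cases hm : pvMatch sec l = true
      · have hh := hk l List.mem_cons_self hm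
        simp only [pvSegs, hh, if_true, pvFlt, pvBad, hm0, List.nil_append]
        rw [ih.2 l [] hm]
        simp [pvFG, hm]
      · by_cases hh : pvHdr l = true
        · simp only [pvSegs, hh, if_true, pvFlt, pvBad, hm0, List.nil_append]
          rw [ih.1 [l] (by intro a b he; cases he; simpa using hm)]
          simp [pvFG, hm, hh]
        · simp only [pvSegs, hh, Bool.false_eq_true, if_false, if_neg]
          have hcons : (h :: t) ++ [l] = h :: (t ++ [l]) := by simp
          rw [hcons, ih.2 h (t ++ [l]) hm0]
          simp [pvFG, hm, hh]

theorem pvA_eq (sec : String) (lines : List String) :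
    remove_tool_config_py lines sec = pvFG sec false lines := by
  have h : remove_tool_config_py lines sec = (lines.foldl (pvStepA sec) ([], false)).1 := rfl
  rw [h, pvA_fold]
  simp

theorem pvB_eq (sec : String) (lines : List String) :
    remove_tool_config_py_alt lines sec = pvFlt sec (pvSegs lines []) := by
  have h : remove_tool_config_py_alt lines sec =
      ((lines.foldl pvStepB ([], [])).1 ++ [(lines.foldl pvStepB ([], [])).2]).foldl
        (pvStepC sec) [] := rfl
  rw [h, pvB_fold2, pvB_fold1]
  simp

-- ===== VERDICT (by name: the statement is the Claim_ definition above) =====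
theorem remove_tool_config_py_spec : Claim_equal_remove_tool_config_py := by
  intro lines sec _hdom hpre
  unfold Spec_remove_tool_config_py
  unfold Pre_remove_tool_config_py at hpre
  rw [pvA_eq, pvB_eq]
  have hk : ∀ l ∈ lines, pvMatch sec l = true → pvHdr l = true := by
    rcases hpre with h | h
    · exact fun l _ hm => pvKey sec h l hm
    · intro l hl hm
      unfold pvMatch at hm
      rw [h l hl] at hm
      exact absurd hm (by simp)
  exact ((pvMain sec lines hk).1 [] (by intro h t he; cases he)).symm
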